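-- pv_equiv track=rewrite | github.com/micahkberg/Advent-of-Code-2023 | Day-12.py | convert_to_tuple
-- ===== SOURCE A (Python) =====
-- def convert_to_tuple(spring_list):
--     output = []
--     count = None
--     for char in spring_list:
--         if char == "#":
--             if not count:
--                 count = 1
--             else:
--                 count += 1
--         elif char in ".?" and count:
--             output.append(count)
--             count = None
--     if count:
--         output.append(count)
--     return tuple(output)
-- ===== SOURCE B (Python) =====
-- def convert_to_tuple(spring_list):
--     chars = list(spring_list)
--     n = len(chars)
--     out = []
--     i = 0
--     while i < n:
--         j = i
--         while j < n and chars[j] not in '.?':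
--             j += 1
--         k = chars[i:j].count('#')
--         if k:
--             out.append(k)
--         i = j + 1
--     return tuple(out)
-- ===== Notes on version B (the rewrite author's own statement) =====
-- stated objective: alternative
-- what changed: B replaces A's single stateful pass (a running '#' count flushed at each separator) by an index-based segment scan: it finds the end of each '.'/'?'-delimited segment, counts '#' inside the segment slice, and keeps nonzero counts.
import Mathlib
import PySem

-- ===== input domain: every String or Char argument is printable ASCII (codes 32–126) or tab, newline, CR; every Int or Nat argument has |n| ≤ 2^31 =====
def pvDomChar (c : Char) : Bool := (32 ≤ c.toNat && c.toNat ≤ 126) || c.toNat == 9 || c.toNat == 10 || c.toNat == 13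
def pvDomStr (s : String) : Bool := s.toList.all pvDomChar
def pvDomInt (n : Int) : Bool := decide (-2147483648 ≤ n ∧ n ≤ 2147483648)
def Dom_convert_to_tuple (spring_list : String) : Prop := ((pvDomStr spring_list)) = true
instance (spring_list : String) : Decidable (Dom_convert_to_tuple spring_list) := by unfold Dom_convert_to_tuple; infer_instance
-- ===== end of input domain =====

-- B changes the decomposition (segment-splitting recursion instead of A's one stateful scan); same cost, not faster.

-- ===== PORT A =====
-- A: one fold over the characters with state (output, count : Option Int);
-- Python truthiness 'not count' (count is None or a positive int) is ported as 'count.getD 0 = 0'.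
def convert_to_tuple (spring_list : String) : List Int :=
  let r := spring_list.toList.foldl
    (fun (st : List Int × Option Int) char =>
      if char = '#' then
        if st.2.getD 0 = 0 then (st.1, some 1) else (st.1, some (st.2.getD 0 + 1))
      else if (char = '.' ∨ char = '?') ∧ st.2.getD 0 ≠ 0 then (st.1 ++ [st.2.getD 0], none)
      else st)
    ([], none)
  if r.2.getD 0 ≠ 0 then r.1 ++ [r.2.getD 0] else r.1

-- ===== PORT B =====
-- B: index-based segment scan — helper for the inner while loop (scan j to the segment end)
def pvSegEnd (chars : List Char) (j : Nat) : Nat :=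
  if h : j < chars.length then
    if ¬(chars[j] = '.' ∨ chars[j] = '?') then pvSegEnd chars (j + 1) else j
  else j
termination_by chars.length - j

-- termination helper for the outer loop: the inner scan never moves backwards
theorem pvSegEnd_ge (chars : List Char) (j : Nat) : j ≤ pvSegEnd chars j := by
  rw [pvSegEnd]
  split
  · split
    · exact le_trans (Nat.le_succ j) (pvSegEnd_ge chars (j + 1))
    · exact le_refl j
  · exact le_refl j
termination_by chars.length - j

-- B: the outer while loop over segment start indices
def pvOuter (chars : List Char) (i : Nat) (out : List Int) : List Int :=
  if _h : i < chars.length then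
    let j := pvSegEnd chars i
    let k : Int := (PySem.List.slice chars (some (i : Int)) (some (j : Int))).count '#'
    pvOuter chars (j + 1) (if k ≠ 0 then out ++ [k] else out)
  else out
termination_by chars.length - i
decreasing_by have := pvSegEnd_ge chars i; omega

def convert_to_tuple_alt (spring_list : String) : List Int :=
  pvOuter spring_list.toList 0 []

-- ===== PRECONDITION & SPEC =====
def Spec_convert_to_tuple (spring_list : String) (out : List Int) : Prop := out = convert_to_tuple_alt spring_list
instance (spring_list : String) (out : List Int) : Decidable (Spec_convert_to_tuple spring_list out) := by unfold Spec_convert_to_tuple; infer_instance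

-- ===== CLAIM (what is proved, stated in full; the proofs are below) =====
def Claim_equal_convert_to_tuple : Prop := ∀ (spring_list : String), Dom_convert_to_tuple spring_list → Spec_convert_to_tuple spring_list (convert_to_tuple spring_list)

-- ===== LEMMAS AND PROOFS =====

-- proof-side names for A's fold step and finalization (definitionally A's code)
def pvStep (st : List Int × Option Int) (char : Char) : List Int × Option Int :=
  if char = '#' then
    if st.2.getD 0 = 0 then (st.1, some 1) else (st.1, some (st.2.getD 0 + 1))
  else if (char = '.' ∨ char = '?') ∧ st.2.getD 0 ≠ 0 then (st.1 ++ [st.2.getD 0], none)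
  else st

def pvFin (r : List Int × Option Int) : List Int :=
  if r.2.getD 0 ≠ 0 then r.1 ++ [r.2.getD 0] else r.1

theorem pvA_eq (s : String) : convert_to_tuple s = pvFin (s.toList.foldl pvStep ([], none)) := rfl

-- reference recursion: counts of the remaining characters given a pending run of k '#'s
def pvRunG (k : Int) : List Char → List Int
  | [] => if k ≠ 0 then [k] else []
  | c :: cs =>
    if c = '#' then pvRunG (k + 1) cs
    else if c = '.' ∨ c = '?' then (if k ≠ 0 then [k] else []) ++ pvRunG 0 cs
    else pvRunG k cs

-- A's fold, from any reachable state, is the already-emitted output ++ pvRunG (pending) (rest)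
theorem pvFoldA (cs : List Char) (out : List Int) (c : Option Int)
    (hinv : c = none ∨ ∃ m : Int, 0 < m ∧ c = some m) :
    pvFin (cs.foldl pvStep (out, c)) = out ++ pvRunG (c.getD 0) cs := by
  induction cs generalizing out c with
  | nil =>
    rcases hinv with h | ⟨m, hm, h⟩ <;> subst h
    · simp [pvFin, pvRunG]
    · have hne : m ≠ 0 := hm.ne'
      simp [pvFin, pvRunG, hne]
  | cons ch cs ih =>
    rw [List.foldl_cons]
    by_cases h1 : ch = '#'
    · subst h1
      by_cases h0 : c.getD 0 = 0
      · rw [show pvStep (out, c) '#' = (out, some 1) by simp [pvStep, h0]]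
        rw [ih out (some 1) (Or.inr ⟨1, one_pos, rfl⟩)]
        simp [pvRunG, h0]
      · rw [show pvStep (out, c) '#' = (out, some (c.getD 0 + 1)) by simp [pvStep, h0]]
        have hm : 0 < c.getD 0 := by
          rcases hinv with h | ⟨m, hmm, h⟩
          · subst h; simp at h0
          · subst h; simpa using hmm
        rw [ih out (some (c.getD 0 + 1)) (Or.inr ⟨_, by omega, rfl⟩)]
        simp [pvRunG]
    · by_cases h2 : ch = '.' ∨ ch = '?'
      · by_cases h0 : c.getD 0 = 0
        · rw [show pvStep (out, c) ch = (out, c) by simp [pvStep, h1, h0]]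
          rw [ih out c hinv]
          simp [pvRunG, h1, h2, h0]
        · rw [show pvStep (out, c) ch = (out ++ [c.getD 0], none)
            by simp [pvStep, h1, h2, h0]]
          rw [ih _ none (Or.inl rfl)]
          simp [pvRunG, h1, h2, h0]
      · rw [show pvStep (out, c) ch = (out, c) by simp [pvStep, h1, h2]]
        rw [ih out c hinv]
        simp [pvRunG, h1, h2]

-- the Bool form of "not a separator" used on the takeWhile side
def pvNonSep (c : Char) : Bool := !(c == '.' || c == '?')

theorem pvTake_takeWhile (l : List Char) : l.take (l.takeWhile pvNonSep).length = l.takeWhile pvNonSep := by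
  induction l with
  | nil => simp
  | cons c cs ih =>
    by_cases h : pvNonSep c
    · simp [h, ih]
    · simp [h]

theorem pvDrop_takeWhile (l : List Char) : l.drop (l.takeWhile pvNonSep).length = l.dropWhile pvNonSep := by
  induction l with
  | nil => simp
  | cons c cs ih =>
    by_cases h : pvNonSep c
    · simp [h, ih]
    · simp [h]

-- the inner scan reaches exactly the end of the leading non-separator segment
theorem pvSegEnd_eq (chars : List Char) (j : Nat) :
    pvSegEnd chars j = j + ((chars.drop j).takeWhile pvNonSep).length := by
  rw [pvSegEnd]
  split
  · rename_i h
    rw [List.drop_eq_getElem_cons h]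
    by_cases hc : chars[j] = '.' ∨ chars[j] = '?'
    · rw [if_neg (not_not.mpr hc)]
      have hns : pvNonSep chars[j] = false := by
        rcases hc with h' | h' <;> simp [pvNonSep, h']
      rw [List.takeWhile_cons, if_neg (by simp [hns])]
      simp
    · rw [if_pos hc]
      have hns : pvNonSep chars[j] = true := by
        simp only [pvNonSep, Bool.not_eq_true']
        simpa [not_or] using hc
      rw [pvSegEnd_eq chars (j + 1)]
      rw [List.takeWhile_cons, if_pos hns]
      simp only [List.length_cons]
      omega
  · rename_i h
    rw [List.drop_eq_nil_of_le (by omega)]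
    simp
termination_by chars.length - j

-- one segment step of pvRunG
theorem pvRunG_seg (l : List Char) (k : Int) :
    pvRunG k l =
      (if k + ((l.takeWhile pvNonSep).count '#' : Int) ≠ 0
        then [k + ((l.takeWhile pvNonSep).count '#' : Int)] else [])
      ++ pvRunG 0 ((l.dropWhile pvNonSep).drop 1) := by
  induction l generalizing k with
  | nil => simp [pvRunG]
  | cons c cs ih =>
    by_cases h1 : c = '#'
    · subst h1
      have hq : pvNonSep '#' = true := by decide
      rw [show pvRunG k ('#' :: cs) = pvRunG (k + 1) cs by simp [pvRunG]]
      rw [ih (k + 1)]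
      simp [hq]
      ring_nf
    · by_cases h2 : c = '.' ∨ c = '?'
      · have hq : pvNonSep c = false := by
          rcases h2 with h' | h' <;> simp [pvNonSep, h']
        rw [show pvRunG k (c :: cs) = (if k ≠ 0 then [k] else []) ++ pvRunG 0 cs
            by simp [pvRunG, h1, h2]]
        simp [hq]
      · have hq : pvNonSep c = true := by
          simp only [pvNonSep, Bool.not_eq_true']
          simpa [not_or] using h2
        rw [show pvRunG k (c :: cs) = pvRunG k cs by simp [pvRunG, h1, h2]]
        rw [ih k]
        simp [hq, h1]

-- the outer loop computes out ++ pvRunG 0 (remaining characters)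
theorem pvOuter_eq (fuel : Nat) : ∀ (chars : List Char) (i : Nat) (out : List Int),
    chars.length - i ≤ fuel →
    pvOuter chars i out = out ++ pvRunG 0 (chars.drop i) := by
  induction fuel with
  | zero =>
    intro chars i out h
    rw [pvOuter, dif_neg (by omega), List.drop_eq_nil_of_le (by omega)]
    simp [pvRunG]
  | succ n ih =>
    intro chars i out h
    rw [pvOuter]
    split
    · rename_i hi
      have hj : pvSegEnd chars i = i + ((chars.drop i).takeWhile pvNonSep).length :=
        pvSegEnd_eq chars i
      have hge : i ≤ pvSegEnd chars i := pvSegEnd_ge chars i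
      rw [ih chars (pvSegEnd chars i + 1) _ (by omega)]
      rw [PySem.List.slice_natCast]
      rw [hj, Nat.add_sub_cancel_left, pvTake_takeWhile]
      conv_rhs => rw [pvRunG_seg (chars.drop i) 0]
      have hrest : chars.drop (i + ((chars.drop i).takeWhile pvNonSep).length + 1)
          = ((chars.drop i).dropWhile pvNonSep).drop 1 := by
        rw [← pvDrop_takeWhile, List.drop_drop, List.drop_drop]
        congr 1
      rw [hrest]
      simp only [zero_add]
      split <;> simp
    · rename_i hi
      rw [List.drop_eq_nil_of_le (by omega)]
      simp [pvRunG]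

-- ===== VERDICT (by name: the statement is the Claim_ definition above) =====
theorem convert_to_tuple_spec : Claim_equal_convert_to_tuple := by
  intro s _
  unfold Spec_convert_to_tuple convert_to_tuple_alt
  rw [pvA_eq, pvOuter_eq s.toList.length s.toList 0 [] (by omega)]
  have := pvFoldA s.toList [] none (Or.inl rfl)
  simpa using this
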